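-- pv_equiv track=rewrite | github.com/labrenzm/cse491-serverz | cse491-day5/day5.py | get_lines_4_5
-- ===== SOURCE A (Python) =====
-- def get_lines_4_5(x):
--     count = 0
--     s = ""
--     for i in x:
--          if i == "\n":
--             count = count + 1
--          if (count == 3) or (count == 4):
--             s+=str(i)
--     return s
-- ===== SOURCE B (Python) =====
-- def get_lines_4_5(x):
--     lines = x.split("\n")
--     if len(lines) <= 3:
--         return ""
--     return "\n" + "\n".join(lines[3:5])
-- ===== Notes on version B (the rewrite author's own statement) =====
-- stated objective: simpler
-- what changed: Replaces the character-by-character newline-counting scan with one split on newlines followed by an index slice and join of lines 3..4.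
import Mathlib
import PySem

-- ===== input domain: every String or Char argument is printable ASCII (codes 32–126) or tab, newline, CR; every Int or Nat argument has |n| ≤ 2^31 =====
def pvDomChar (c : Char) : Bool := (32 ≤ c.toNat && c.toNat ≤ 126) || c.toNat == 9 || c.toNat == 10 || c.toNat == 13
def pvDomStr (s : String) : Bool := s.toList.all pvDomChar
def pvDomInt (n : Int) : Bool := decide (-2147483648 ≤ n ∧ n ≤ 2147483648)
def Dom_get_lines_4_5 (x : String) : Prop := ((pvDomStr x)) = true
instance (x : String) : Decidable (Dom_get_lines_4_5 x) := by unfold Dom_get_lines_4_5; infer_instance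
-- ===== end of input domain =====

-- B replaces A's per-character newline-counting scan by one split("\n") plus a slice/join of lines 3..4 (simpler; same return value).

-- ===== PORT A =====
-- Python string accumulation s += i is ported as a List Char accumulator, converted by String.ofList at the end (exact).
def get_lines_4_5 (x : String) : String :=
  let r := x.toList.foldl
    (fun (st : Int × List Char) i =>
      let count := if i = '\n' then st.1 + 1 else st.1
      (count, if count = 3 ∨ count = 4 then st.2 ++ [i] else st.2))
    (0, [])
  String.ofList r.2

-- ===== PORT B =====
def get_lines_4_5_alt (x : String) : String :=
  let lines := PySem.Chars.splitOn x.toList ['\n']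
  if lines.length ≤ 3 then ""
  else String.ofList ('\n' :: PySem.Chars.join ['\n'] (PySem.List.slice lines (some 3) (some 5)))

-- ===== PRECONDITION & SPEC =====
def Spec_get_lines_4_5 (x : String) (out : String) : Prop := out = get_lines_4_5_alt x
instance (x : String) (out : String) : Decidable (Spec_get_lines_4_5 x out) := by unfold Spec_get_lines_4_5; infer_instance

-- ===== CLAIM (what is proved, stated in full; the proofs are below) =====
def Claim_equal_get_lines_4_5 : Prop := ∀ (x : String), Dom_get_lines_4_5 x → Spec_get_lines_4_5 x (get_lines_4_5 x)

-- ===== LEMMAS AND PROOFS =====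

-- reference split on '\n' (no fuel)
def pvSplit (pre : List Char) : List Char → List (List Char)
  | [] => [pre]
  | c :: t => if c = '\n' then pre :: pvSplit [] t else pvSplit (pre ++ [c]) t

-- A's scan as a pure function of the current newline count
def pvFA (c : Int) : List Char → List Char
  | [] => []
  | i :: t =>
      let c' := if i = '\n' then c + 1 else c
      (if c' = 3 ∨ c' = 4 then [i] else []) ++ pvFA c' t

def pvH (sp : List (List Char)) : List Char :=
  sp.getD 0 [] ++ (if sp.length ≤ 1 then [] else '\n' :: sp.getD 1 [])

def pvF (m : Nat) (sp : List (List Char)) : List Char :=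
  if sp.length ≤ m then []
  else '\n' :: (sp.getD m [] ++ (if sp.length ≤ m + 1 then [] else '\n' :: sp.getD (m + 1) []))

theorem pvSplit_rep (l : List Char) (pre : List Char) :
    pvSplit pre l = (pre ++ (pvSplit [] l).getD 0 []) :: (pvSplit [] l).tail := by
  induction l generalizing pre with
  | nil => simp [pvSplit]
  | cons c t ih =>
    by_cases hc : c = '\n'
    · simp [pvSplit, hc]
    · rw [show pvSplit pre (c :: t) = pvSplit (pre ++ [c]) t by simp [pvSplit, hc],
        show pvSplit [] (c :: t) = pvSplit [c] t by simp [pvSplit, hc],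
        ih (pre ++ [c]), ih [c]]
      simp

theorem pvSplit_go (fuel : Nat) (l cur : List Char) (acc : List (List Char)) (h : l.length < fuel) :
    PySem.Chars.splitOn.go ['\n'] fuel l cur acc = acc.reverse ++ pvSplit cur.reverse l := by
  induction fuel generalizing l cur acc with
  | zero => omega
  | succ n ih =>
    cases l with
    | nil => simp [PySem.Chars.splitOn.go, pvSplit]
    | cons c t =>
      by_cases hc : c = '\n'
      · subst hc
        rw [show PySem.Chars.splitOn.go ['\n'] (n+1) ('\n' :: t) cur acc
              = PySem.Chars.splitOn.go ['\n'] n t [] (cur.reverse :: acc) by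
            simp [PySem.Chars.splitOn.go, List.isPrefixOf]]
        rw [ih t [] (cur.reverse :: acc) (by simpa using Nat.lt_of_succ_lt_succ h)]
        simp [pvSplit]
      · rw [show PySem.Chars.splitOn.go ['\n'] (n+1) (c :: t) cur acc
              = PySem.Chars.splitOn.go ['\n'] n t (c :: cur) acc by
            simp [PySem.Chars.splitOn.go, List.isPrefixOf, Ne.symm hc]]
        rw [ih t (c :: cur) acc (by simpa using Nat.lt_of_succ_lt_succ h)]
        simp [pvSplit, hc]

theorem pvSplitOn_eq (l : List Char) : PySem.Chars.splitOn l ['\n'] = pvSplit [] l := by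
  unfold PySem.Chars.splitOn
  rw [pvSplit_go (l.length + 1) l [] [] (by omega)]
  simp

theorem pvSplit_nil_cons (l : List Char) :
    pvSplit [] l = (pvSplit [] l).getD 0 [] :: (pvSplit [] l).tail := by
  simpa using pvSplit_rep l []

theorem pvSplit_length_pos (l : List Char) : 0 < (pvSplit [] l).length := by
  rw [pvSplit_nil_cons l]; simp

theorem pvFoldA (l : List Char) (c : Int) (s : List Char) :
    (l.foldl
      (fun (st : Int × List Char) i =>
        let count := if i = '\n' then st.1 + 1 else st.1
        (count, if count = 3 ∨ count = 4 then st.2 ++ [i] else st.2))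
      (c, s)).2 = s ++ pvFA c l := by
  induction l generalizing c s with
  | nil => simp [pvFA]
  | cons i t ih =>
    simp only [List.foldl_cons, pvFA]
    by_cases hi : i = '\n' <;> by_cases h34 : (if i = '\n' then c + 1 else c) = 3 ∨ (if i = '\n' then c + 1 else c) = 4 <;>
      simp_all

theorem pvFA_big (l : List Char) (c : Int) (h : 4 < c) : pvFA c l = [] := by
  induction l generalizing c with
  | nil => rfl
  | cons i t ih =>
    simp only [pvFA]
    by_cases hi : i = '\n' <;> simp [hi] <;>
      [ exact ⟨by omega, ih (c+1) (by omega)⟩ ; exact ⟨by omega, ih c h⟩ ]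

theorem pvFA_four (l : List Char) : pvFA 4 l = (pvSplit [] l).getD 0 [] := by
  induction l with
  | nil => rfl
  | cons i t ih =>
    by_cases hi : i = '\n'
    · subst hi
      simp [pvFA, pvSplit, pvFA_big t 5 (by omega)]
    · rw [show pvSplit [] (i :: t) = pvSplit [i] t by simp [pvSplit, hi], pvSplit_rep t [i]]
      simp [pvFA, hi, ih]

theorem pvFA_three (l : List Char) : pvFA 3 l = pvH (pvSplit [] l) := by
  induction l with
  | nil => rfl
  | cons i t ih =>
    by_cases hi : i = '\n'
    · subst hi
      have hpos := pvSplit_length_pos t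
      simp only [pvFA, pvSplit]
      simp [pvFA_four t, pvH, show ¬ (pvSplit [] t).length + 1 ≤ 1 by omega]
    · rw [show pvSplit [] (i :: t) = pvSplit [i] t by simp [pvSplit, hi], pvSplit_rep t [i]]
      rw [pvSplit_nil_cons t] at ih
      simp [pvFA, hi, ih, pvH]

theorem pvF_cons (a : List Char) (sp : List (List Char)) (m : Nat) :
    pvF (m + 1) (a :: sp) = pvF m sp := by
  simp [pvF]

theorem pvF_zero (sp : List (List Char)) (h : 0 < sp.length) : pvF 0 sp = '\n' :: pvH sp := by
  unfold pvF pvH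
  rw [if_neg (by omega)]

theorem pvF_head (a b : List Char) (sp : List (List Char)) (m : Nat) (hm : 1 ≤ m) :
    pvF m (a :: sp) = pvF m (b :: sp) := by
  obtain ⟨k, rfl⟩ : ∃ k, m = k + 1 := ⟨m - 1, by omega⟩
  rw [pvF_cons, pvF_cons]

theorem pvFA_nl_hit (c : Int) (t : List Char) (h : c + 1 = 3 ∨ c + 1 = 4) :
    pvFA c ('\n' :: t) = '\n' :: pvFA (c + 1) t := by
  simp [pvFA, h]

theorem pvFA_nl_miss (c : Int) (t : List Char) (h : ¬(c + 1 = 3 ∨ c + 1 = 4)) :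
    pvFA c ('\n' :: t) = pvFA (c + 1) t := by
  simp [pvFA, h]

theorem pvFA_ch_miss (c : Int) (i : Char) (t : List Char) (hi : i ≠ '\n') (h : ¬(c = 3 ∨ c = 4)) :
    pvFA c (i :: t) = pvFA c t := by
  simp [pvFA, hi, h]

theorem pvFA_low (l : List Char) (m : Nat) (hm : 1 ≤ m) :
    pvFA (3 - (m : Int)) l = pvF m (pvSplit [] l) := by
  induction l generalizing m with
  | nil =>
    simp [pvFA, pvSplit, pvF, hm]
  | cons i t ih =>
    by_cases hi : i = '\n'
    · subst hi
      rw [show pvSplit [] ('\n' :: t) = [] :: pvSplit [] t by simp [pvSplit]]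
      obtain ⟨k, rfl⟩ : ∃ k, m = k + 1 := ⟨m - 1, by omega⟩
      rw [pvF_cons]
      rcases Nat.eq_zero_or_pos k with hk | hk
      · -- k = 0, i.e. m = 1 : this '\n' is the third newline, output starts here
        subst hk
        rw [show (3 : Int) - ((0 + 1 : Nat) : Int) = 2 by norm_num,
          pvFA_nl_hit 2 t (by norm_num),
          show (2 : Int) + 1 = 3 by norm_num, pvFA_three t,
          pvF_zero _ (pvSplit_length_pos t)]
      · -- k ≥ 1 : still skipping lines
        rw [pvFA_nl_miss _ t (by omega),
          show (3 : Int) - ((k + 1 : Nat) : Int) + 1 = 3 - (k : Int) by push_cast; ring,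
          ih k hk]
    · rw [pvFA_ch_miss _ i t hi (by omega), ih m hm,
        show pvSplit [] (i :: t) = pvSplit [i] t by simp [pvSplit, hi], pvSplit_rep t [i],
        pvSplit_nil_cons t]
      simp only [List.singleton_append]
      exact pvF_head _ _ _ m hm

theorem pvF_three_join (sp : List (List Char)) (h : 3 < sp.length) :
    pvF 3 sp = '\n' :: PySem.Chars.join ['\n'] ((sp.drop 3).take 2) := by
  match sp, h with
  | s0 :: s1 :: s2 :: s3 :: rest, _ =>
    cases rest with
    | nil =>
      simp [pvF, PySem.Chars.join, List.intercalate]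
    | cons s4 r =>
      unfold pvF
      rw [if_neg (by simp)]
      simp [PySem.Chars.join, List.intercalate]

-- ===== VERDICT (by name: the statement is the Claim_ definition above) =====
theorem get_lines_4_5_spec : Claim_equal_get_lines_4_5 := by
  intro x _
  show get_lines_4_5 x = get_lines_4_5_alt x
  simp only [get_lines_4_5, get_lines_4_5_alt]
  rw [pvFoldA x.toList 0 [], pvSplitOn_eq]
  have h03 : pvFA 0 x.toList = pvF 3 (pvSplit [] x.toList) := by
    have := pvFA_low x.toList 3 (by omega)
    norm_num at this
    exact this
  simp only [List.nil_append, h03]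
  by_cases h : (pvSplit [] x.toList).length ≤ 3
  · rw [if_pos h]
    unfold pvF
    rw [if_pos h]
  · rw [if_neg h,
      show PySem.List.slice (pvSplit [] x.toList) (some 3) (some 5)
          = ((pvSplit [] x.toList).drop 3).take 2 from
        by simpa using PySem.List.slice_natCast (pvSplit [] x.toList) 3 5,
      pvF_three_join _ (by omega)]
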